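-- pv_equiv track=rewrite | github.com/ostraczkowski/raport-aktywno-ci-sszag | raport_aktywnosci_sszag/main.py | _sort_reports_by_user
-- ===== SOURCE A (Python) =====
-- from collections import OrderedDict
--
-- def _sort_reports_by_user(reports):
--     sorted_by_user = OrderedDict(sorted(reports.items(), key=lambda t: t[0]))
--     for user in sorted_by_user:
--         sorted_by_year = OrderedDict(sorted(sorted_by_user[user].items(), key=lambda t: t[0], reverse=True))
--         for year in sorted_by_year:
--             sorted_by_month = OrderedDict(sorted(sorted_by_year[year].items(), key=lambda t: t[0]))
--             sorted_by_year[year] = sorted_by_month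
--         sorted_by_user[user] = sorted_by_year
--     return sorted_by_user
-- ===== SOURCE B (Python) =====
-- from collections import OrderedDict
--
--
-- def _insertion_sorted_items(d, descending):
--     """Stable insertion sort by key: scan for the first element that must come
--     after k (ascending: key > k; descending: key < k) and insert there."""
--     items = []
--     for k, v in d.items():
--         i = 0
--         while i < len(items) and not ((items[i][0] < k) if descending else (items[i][0] > k)):
--             i += 1
--         items.insert(i, (k, v))
--     return items
--
--
-- def _sort_reports_by_user(reports):
--     def go(d, depth):
--         return OrderedDict(
--             (k, v if depth == 3 else go(v, depth + 1))
--             for k, v in _insertion_sorted_items(d, depth == 2))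
--     return go(reports, 1)
-- ===== Notes on version B (the rewrite author's own statement) =====
-- stated objective: alternative
-- what changed: Replaced the three explicit nested loops that call sorted() and reassign values back into mutable OrderedDicts with a hand-written stable insertion sort (scan for the insertion point, list.insert) driven by one depth-indexed recursive traversal go(d, depth) that builds each level afresh and never mutates a dict.
import Mathlib
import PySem

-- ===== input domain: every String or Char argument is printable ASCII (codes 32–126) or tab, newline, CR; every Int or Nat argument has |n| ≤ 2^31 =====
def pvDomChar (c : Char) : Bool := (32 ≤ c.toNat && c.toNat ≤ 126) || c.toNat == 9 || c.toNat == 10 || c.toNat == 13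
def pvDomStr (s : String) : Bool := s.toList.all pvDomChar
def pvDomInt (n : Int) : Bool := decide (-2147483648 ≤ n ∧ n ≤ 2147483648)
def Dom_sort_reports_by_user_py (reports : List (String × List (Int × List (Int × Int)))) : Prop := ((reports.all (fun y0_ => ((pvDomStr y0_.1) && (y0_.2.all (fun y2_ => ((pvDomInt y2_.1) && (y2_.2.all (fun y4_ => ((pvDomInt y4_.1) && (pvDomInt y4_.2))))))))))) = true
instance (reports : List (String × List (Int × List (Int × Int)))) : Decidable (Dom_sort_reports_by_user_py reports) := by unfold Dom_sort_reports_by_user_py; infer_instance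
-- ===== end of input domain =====

-- B replaces A's three nested loops over sorted()-built OrderedDicts by a hand-written stable
-- insertion sort composed through one depth-driven recursive traversal, never mutating a dict (objective: alternative).


-- ===== PORT A =====
-- 'd[k] = v' on an association list representing a dict: overwrite the value at the
-- first occurrence of k, keeping its position (k is always present when A assigns).
def pvDictSet {α β : Type} [DecidableEq α] (l : List (α × β)) (k : α) (v : β) : List (α × β) :=
  match l with
  | [] => [(k, v)]
  | (k', v') :: t => if k' = k then (k', v) :: t else (k', v') :: pvDictSet t k v

-- A: sort users ascending, then loop over the users reassigning each value to its
-- year-dict sorted descending, whose values are in turn reassigned to month-dicts sorted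
-- ascending.  The 'for user in sorted_by_user: … sorted_by_user[user] = …' loops become
-- foldl's over the sorted pairs performing the same in-place reassignments via pvDictSet
-- (reading the pair's value = reading d[key], since dict keys are unique — Pre_).
def sort_reports_by_user_py (reports : List (String × List (Int × List (Int × Int)))) : List (String × List (Int × List (Int × Int))) :=
  let sorted_by_user := PySem.List.sorted reports (fun t => t.1) false
  sorted_by_user.foldl
    (fun su up =>
      let sorted_by_year := PySem.List.sorted up.2 (fun t => t.1) true
      let sorted_by_year' := sorted_by_year.foldl
        (fun sy yp =>
          let sorted_by_month := PySem.List.sorted yp.2 (fun t => t.1) false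
          pvDictSet sy yp.1 sorted_by_month)
        sorted_by_year
      pvDictSet su up.1 sorted_by_year')
    sorted_by_user

-- ===== PORT B =====
-- _insertion_sorted_items' inner while-loop: scan `items` for the first pair that must come
-- after (k, v) and insert there; the scan-then-insert is written as one structural recursion.
def pvInsertPair {α β : Type} [LinearOrder α] (k : α) (v : β) (items : List (α × β)) (descending : Bool) : List (α × β) :=
  match items with
  | [] => [(k, v)]
  | (k0, v0) :: t =>
      if (if descending then k0 < k else k0 > k) then (k, v) :: (k0, v0) :: t
      else (k0, v0) :: pvInsertPair k v t descending

-- _insertion_sorted_items(d, descending): insert each pair in turn into the growing ordered list.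
def pvInsSortItems {α β : Type} [LinearOrder α] (d : List (α × β)) (descending : Bool) : List (α × β) :=
  d.foldl (fun items p => pvInsertPair p.1 p.2 items descending) []

-- go(d, depth): one traversal; the value types differ per depth, so the three typed
-- instances of go (depth 1, 2, 3; at depth 3 the value is kept unchanged) are written out.
def sort_reports_by_user_py_alt (reports : List (String × List (Int × List (Int × Int)))) : List (String × List (Int × List (Int × Int))) :=
  (pvInsSortItems reports false).map (fun p => (p.1,
    (pvInsSortItems p.2 true).map (fun q => (q.1,
      pvInsSortItems q.2 false))))

-- ===== PRECONDITION & SPEC =====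
-- The inputs stand for Python dicts, whose keys are unique; Pre_ excludes only association
-- lists with a duplicate key at some level, which correspond to no Python input of A.
def Pre_sort_reports_by_user_py (reports : List (String × List (Int × List (Int × Int)))) : Prop :=
  (reports.map Prod.fst).Nodup ∧
    ∀ p ∈ reports, (p.2.map Prod.fst).Nodup ∧ ∀ q ∈ p.2, (q.2.map Prod.fst).Nodup
instance (reports : List (String × List (Int × List (Int × Int)))) : Decidable (Pre_sort_reports_by_user_py reports) := by unfold Pre_sort_reports_by_user_py; infer_instance

def pvWitness_sort_reports_by_user_py : (List (String × List (Int × List (Int × Int)))) :=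
  [("bob", [(2021, [(1, 3), (2, 4)]), (2020, [(5, 1)])]), ("alice", [])]

def Spec_sort_reports_by_user_py (reports : List (String × List (Int × List (Int × Int)))) (out : List (String × List (Int × List (Int × Int)))) : Prop := out = sort_reports_by_user_py_alt reports
instance (reports : List (String × List (Int × List (Int × Int)))) (out : List (String × List (Int × List (Int × Int)))) : Decidable (Spec_sort_reports_by_user_py reports out) := by unfold Spec_sort_reports_by_user_py; infer_instance

-- ===== CLAIM (what is proved, stated in full; the proofs are below) =====
def Claim_equal_sort_reports_by_user_py : Prop := ∀ (reports : List (String × List (Int × List (Int × Int)))), Dom_sort_reports_by_user_py reports → Pre_sort_reports_by_user_py reports → Spec_sort_reports_by_user_py reports (sort_reports_by_user_py reports)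

-- ===== LEMMAS AND PROOFS =====

-- ---- A-side: the reassignment loops are maps over the sorted lists ----

theorem pvDictSet_cons_ne {α β : Type} [DecidableEq α] (k k' : α) (w : β) (acc : List (α × β)) (v : β)
    (h : k' ≠ k) : pvDictSet ((k, w) :: acc) k' v = (k, w) :: pvDictSet acc k' v := by
  simp only [pvDictSet]
  rw [if_neg (fun h' : k = k' => h (Eq.symm h'))]

theorem foldl_pvDictSet_cons {α β : Type} [DecidableEq α] (f : β → β) (t : List (α × β)) :
    ∀ (k : α) (w : β) (acc : List (α × β)), k ∉ t.map Prod.fst →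
      t.foldl (fun a p => pvDictSet a p.1 (f p.2)) ((k, w) :: acc)
        = (k, w) :: t.foldl (fun a p => pvDictSet a p.1 (f p.2)) acc := by
  induction t with
  | nil => intro k w acc _; rfl
  | cons p t ih =>
      intro k w acc hk
      simp only [List.map_cons, List.mem_cons] at hk
      push Not at hk
      simp only [List.foldl_cons]
      rw [pvDictSet_cons_ne _ _ _ _ _ (fun h => hk.1 h.symm), ih _ _ _ hk.2]

theorem foldl_pvDictSet_eq_map {α β : Type} [DecidableEq α] (f : β → β) :
    ∀ (l : List (α × β)), (l.map Prod.fst).Nodup →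
      l.foldl (fun a p => pvDictSet a p.1 (f p.2)) l = l.map (fun p => (p.1, f p.2)) := by
  intro l
  induction l with
  | nil => intro _; rfl
  | cons p t ih =>
      intro hnd
      obtain ⟨k, v⟩ := p
      simp only [List.map_cons, List.nodup_cons] at hnd
      simp only [List.foldl_cons, List.map_cons]
      have h1 : pvDictSet ((k, v) :: t) k (f v) = (k, f v) :: t := by simp [pvDictSet]
      rw [h1, foldl_pvDictSet_cons f t k (f v) t hnd.1, ih hnd.2]

theorem nodup_keys_sorted {α β : Type} [LinearOrder α] (l : List (α × β)) (rev : Bool)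
    (h : (l.map Prod.fst).Nodup) :
    ((PySem.List.sorted l (fun t => t.1) rev).map Prod.fst).Nodup :=
  ((PySem.List.sorted_perm l (fun t => t.1) rev).map Prod.fst).nodup_iff.mpr h

-- ---- B-side: the insertion sort equals Python's sorted on nodup keys ----

theorem pvInsertPair_perm {α β : Type} [LinearOrder α] (k : α) (v : β) (d : Bool) :
    ∀ (items : List (α × β)), (pvInsertPair k v items d).Perm ((k, v) :: items) := by
  intro items
  induction items with
  | nil => simp [pvInsertPair]
  | cons p t ih =>
      obtain ⟨k0, v0⟩ := p
      simp only [pvInsertPair]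
      split <;> try split
      all_goals first
        | exact List.Perm.refl _
        | exact ((ih.cons (k0, v0)).trans (List.Perm.swap _ _ _))

theorem foldl_pvInsertPair_perm {α β : Type} [LinearOrder α] (d : Bool) :
    ∀ (l acc : List (α × β)),
      (l.foldl (fun items p => pvInsertPair p.1 p.2 items d) acc).Perm (l ++ acc) := by
  intro l
  induction l with
  | nil => intro acc; simp
  | cons p t ih =>
      intro acc
      simp only [List.foldl_cons, List.cons_append]
      exact ((ih _).trans ((pvInsertPair_perm p.1 p.2 d acc).append_left t)).trans
        List.perm_middle

theorem pairwise_pvInsertPair_asc {α β : Type} [LinearOrder α] (k : α) (v : β) :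
    ∀ (items : List (α × β)), items.Pairwise (fun a b => a.1 < b.1) →
      (∀ q ∈ items, q.1 ≠ k) →
      (pvInsertPair k v items false).Pairwise (fun a b => a.1 < b.1) := by
  intro items
  induction items with
  | nil => intro _ _; simp [pvInsertPair]
  | cons p t ih =>
      intro hp hk
      obtain ⟨k0, v0⟩ := p
      rw [List.pairwise_cons] at hp
      simp only [pvInsertPair, Bool.false_eq_true, if_false]
      split
      · rename_i hlt
        refine List.Pairwise.cons ?_ (List.pairwise_cons.mpr hp)
        intro q hq
        rcases List.mem_cons.mp hq with h | h
        · subst h; exact hlt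
        · exact lt_trans hlt (hp.1 q h)
      · rename_i hnlt
        have hk0 : k0 < k :=
          lt_of_le_of_ne (le_of_not_gt hnlt) (hk (k0, v0) (List.mem_cons_self ..))
        refine List.Pairwise.cons ?_ (ih hp.2 (fun q hq => hk q (List.mem_cons_of_mem _ hq)))
        intro q hq
        rcases List.mem_cons.mp ((pvInsertPair_perm k v false t).mem_iff.mp hq) with h | h
        · subst h; exact hk0
        · exact hp.1 q h

theorem pairwise_pvInsertPair_desc {α β : Type} [LinearOrder α] (k : α) (v : β) :
    ∀ (items : List (α × β)), items.Pairwise (fun a b => b.1 < a.1) →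
      (∀ q ∈ items, q.1 ≠ k) →
      (pvInsertPair k v items true).Pairwise (fun a b => b.1 < a.1) := by
  intro items
  induction items with
  | nil => intro _ _; simp [pvInsertPair]
  | cons p t ih =>
      intro hp hk
      obtain ⟨k0, v0⟩ := p
      rw [List.pairwise_cons] at hp
      simp only [pvInsertPair, if_true]
      split
      · rename_i hlt
        refine List.Pairwise.cons ?_ (List.pairwise_cons.mpr hp)
        intro q hq
        rcases List.mem_cons.mp hq with h | h
        · subst h; exact hlt
        · exact lt_trans (hp.1 q h) hlt
      · rename_i hnlt
        have hk0 : k < k0 :=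
          lt_of_le_of_ne (le_of_not_gt hnlt) (fun h => hk (k0, v0) (List.mem_cons_self ..) h.symm)
        refine List.Pairwise.cons ?_ (ih hp.2 (fun q hq => hk q (List.mem_cons_of_mem _ hq)))
        intro q hq
        rcases List.mem_cons.mp ((pvInsertPair_perm k v true t).mem_iff.mp hq) with h | h
        · subst h; exact hk0
        · exact hp.1 q h

theorem pairwise_foldl_pvInsertPair {α β : Type} [LinearOrder α] (d : Bool)
    (R : α × β → α × β → Prop)
    (hins : ∀ (k : α) (v : β) (items : List (α × β)), items.Pairwise R →
      (∀ q ∈ items, q.1 ≠ k) → (pvInsertPair k v items d).Pairwise R) :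
    ∀ (l acc : List (α × β)), (l.map Prod.fst ++ acc.map Prod.fst).Nodup → acc.Pairwise R →
      (l.foldl (fun items p => pvInsertPair p.1 p.2 items d) acc).Pairwise R := by
  intro l
  induction l with
  | nil => intro acc _ hacc; exact hacc
  | cons p t ih =>
      intro acc hnd hacc
      simp only [List.map_cons, List.cons_append, List.nodup_cons, List.mem_append] at hnd
      push Not at hnd
      simp only [List.foldl_cons]
      apply ih
      · have hperm : (t.map Prod.fst ++ (pvInsertPair p.1 p.2 acc d).map Prod.fst).Perm
            (p.1 :: (t.map Prod.fst ++ acc.map Prod.fst)) := by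
          refine (((pvInsertPair_perm p.1 p.2 d acc).map Prod.fst).append_left
            (t.map Prod.fst)).trans ?_
          simp only [List.map_cons]
          exact List.perm_middle
        exact hperm.nodup_iff.mpr (List.nodup_cons.mpr ⟨by
          simp only [List.mem_append]; push Not; exact ⟨hnd.1.1, hnd.1.2⟩, hnd.2⟩)
      · exact hins p.1 p.2 acc hacc
          (fun q hq hq' => hnd.1.2 (List.mem_map.mpr ⟨q, hq, hq'⟩))

theorem pvInsSortItems_eq_sorted_asc {α β : Type} [LinearOrder α]
    (l : List (α × β)) (h : (l.map Prod.fst).Nodup) :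
    pvInsSortItems l false = PySem.List.sorted l (fun t => t.1) false := by
  refine (PySem.List.sorted_eq_of_perm_of_pairwise_lt _ _ _ ?_ ?_).symm
  · simpa using foldl_pvInsertPair_perm false l []
  · exact pairwise_foldl_pvInsertPair false _ pairwise_pvInsertPair_asc l [] (by simpa using h)
      (List.Pairwise.nil)

theorem pvInsSortItems_eq_sorted_desc {α β : Type} [LinearOrder α]
    (l : List (α × β)) (h : (l.map Prod.fst).Nodup) :
    pvInsSortItems l true = PySem.List.sorted l (fun t => t.1) true := by
  refine (PySem.List.sorted_rev_eq_of_perm_of_pairwise_gt _ _ _ ?_ ?_).symm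
  · simpa using foldl_pvInsertPair_perm true l []
  · exact pairwise_foldl_pvInsertPair true _ pairwise_pvInsertPair_desc l [] (by simpa using h)
      (List.Pairwise.nil)

-- ===== VERDICT (by name: the statement is the Claim_ definition above) =====
theorem sort_reports_by_user_py_spec : Claim_equal_sort_reports_by_user_py := by
  intro reports _ hpre
  obtain ⟨hnd, hin⟩ := hpre
  show sort_reports_by_user_py reports = sort_reports_by_user_py_alt reports
  unfold sort_reports_by_user_py sort_reports_by_user_py_alt
  rw [foldl_pvDictSet_eq_map
        (fun yd =>
          let sorted_by_year := PySem.List.sorted yd (fun t => t.1) true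
          sorted_by_year.foldl
            (fun sy yp => pvDictSet sy yp.1 (PySem.List.sorted yp.2 (fun t => t.1) false))
            sorted_by_year)
        _ (nodup_keys_sorted reports false hnd),
      pvInsSortItems_eq_sorted_asc reports hnd]
  apply List.map_congr_left
  intro p hp
  have hp' : p ∈ reports := (PySem.List.mem_sorted reports (fun t => t.1) false p).mp hp
  obtain ⟨hnd2, hin2⟩ := hin p hp'
  show (p.1, _) = (p.1, _)
  congr 1
  rw [foldl_pvDictSet_eq_map (fun md => PySem.List.sorted md (fun t => t.1) false)
        _ (nodup_keys_sorted p.2 true hnd2),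
      pvInsSortItems_eq_sorted_desc p.2 hnd2]
  apply List.map_congr_left
  intro q hq
  have hq' : q ∈ p.2 := (PySem.List.mem_sorted p.2 (fun t => t.1) true q).mp hq
  show (q.1, _) = (q.1, _)
  congr 1
  exact (pvInsSortItems_eq_sorted_asc q.2 (hin2 q hq')).symm
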